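-- pv_equiv track=rewrite | github.com/theaayushstha1/COSC_352_FALL_2025 | Eian Capers/project_3/Project_3.py | find_all_tables
-- ===== SOURCE A (Python) =====
-- def find_all_tables(html):
--     """Return list of <table>...</table> strings."""
--     tables, start = [], 0
--     lower = html.lower()
--     while True:
--         tstart = lower.find("<table", start)
--         if tstart == -1:
--             break
--         tend = lower.find("</table>", tstart)
--         if tend == -1:
--             break
--         tables.append(html[tstart:tend + 8])
--         start = tend + 8
--     return tables
-- ===== SOURCE B (Python) =====
-- def find_all_tables(html):
--     """Return list of <table>...</table> strings."""
--     lower = html.lower()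
--     tables, pos = [], 0
--     for seg in lower.split("</table>")[:-1]:
--         end = pos + len(seg) + 8
--         i = seg.find("<table")
--         if i != -1:
--             tables.append(html[pos + i:end])
--         pos = end
--     return tables
-- ===== Notes on version B (the rewrite author's own statement) =====
-- stated objective: alternative
-- what changed: B lowercases once, splits the lowered HTML on the closing table tag in one pass, and collects one table per closed segment (at the first opening-tag prefix inside it), replacing A's while-loop cursor that repeatedly calls find for the opening and then the closing tag.
import Mathlib
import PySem

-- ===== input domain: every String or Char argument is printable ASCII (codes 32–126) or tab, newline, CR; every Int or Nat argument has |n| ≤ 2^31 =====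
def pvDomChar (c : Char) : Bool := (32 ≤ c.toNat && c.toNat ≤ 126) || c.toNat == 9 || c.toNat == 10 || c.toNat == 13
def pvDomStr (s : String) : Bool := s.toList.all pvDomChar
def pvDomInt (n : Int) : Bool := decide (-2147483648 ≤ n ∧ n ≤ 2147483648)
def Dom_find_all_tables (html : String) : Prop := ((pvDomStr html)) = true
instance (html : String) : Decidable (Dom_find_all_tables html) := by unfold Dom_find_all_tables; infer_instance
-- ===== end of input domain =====

-- B extracts the same table substrings by splitting the lowercased HTML once on the closing
-- table tag and doing a single pass over the segments, instead of A's cursor loop that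
-- repeatedly calls find for the opening and the closing tag (objective: alternative, same cost).

-- ===== PORT A =====
-- helpers needed by the port's termination proof (cited in decreasing_by):
lemma pv_find_neg_or (s sub : List Char) :
    PySem.Chars.find s sub = -1 ∨ 0 ≤ PySem.Chars.find s sub := by
  by_cases h : sub <:+: s
  · exact Or.inr ((PySem.Chars.find_nonneg_iff s sub).mpr h)
  · exact Or.inl ((PySem.Chars.find_eq_neg_one_iff s sub).mpr h)

lemma pv_findFrom_bounds (s sub : List Char) (k : Int) (hk : 0 ≤ k)
    (h : PySem.Chars.findFrom s sub k none ≠ -1) :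
    k ≤ PySem.Chars.findFrom s sub k none ∧ PySem.Chars.findFrom s sub k none ≤ s.length := by
  have hf := pv_find_neg_or (List.drop k.toNat (List.take ((s.length : Int)).toNat s)) sub
  have hl := PySem.Chars.find_le_length (List.drop k.toNat (List.take ((s.length : Int)).toNat s)) sub
  unfold PySem.Chars.findFrom at *
  simp only [not_lt.mpr hk, if_false] at *
  rcases lt_or_ge (s.length : Int) k with hlt | hge
  · simp only [if_pos hlt] at h; omega
  · simp only [if_neg (not_lt.mpr hge)] at h ⊢
    simp only [Int.toNat_natCast, List.take_length] at h hf hl ⊢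
    simp only [List.length_drop] at hl
    split at h <;> split <;> omega

-- the while-True loop of A, one recursive step per extracted table
def pvTablesAux (html lower : String) (start : Nat) (tables : List String) : List String :=
  let tstart := PySem.Str.findFrom lower "<table" (start : Int) none
  if tstart = -1 then tables
  else
    let tend := PySem.Str.findFrom lower "</table>" tstart none
    if tend = -1 then tables
    else
      pvTablesAux html lower (tend + 8).toNat
        (tables ++ [PySem.Str.slice html (some tstart) (some (tend + 8))])
termination_by lower.toList.length + 8 - start
decreasing_by
  rename_i h1 h2
  have e1 : tstart = PySem.Str.findFrom lower "<table" (start : Int) none := rfl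
  have e2 : tend = PySem.Str.findFrom lower "</table>" tstart none := rfl
  rw [e1] at h1
  rw [e2, e1] at h2
  simp only [PySem.Str.findFrom_eq] at h1 h2 ⊢
  have b1 := pv_findFrom_bounds lower.toList "<table".toList (start : Int) (by positivity) h1
  have b2 := pv_findFrom_bounds lower.toList "</table>".toList _ (by omega) h2
  omega

def find_all_tables (html : String) : List String :=
  pvTablesAux html (PySem.Str.lower html) 0 []


-- ===== PORT B =====
def pvStepB (html : String) (st : List String × Int) (seg : List Char) : List String × Int :=
  let e := st.2 + seg.length + 8
  let i := PySem.Chars.find seg "<table".toList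
  (if i ≠ -1 then st.1 ++ [PySem.Str.slice html (some (st.2 + i)) (some e)] else st.1, e)

def find_all_tables_alt (html : String) : List String :=
  let lower := PySem.Str.lower html
  let parts := PySem.Chars.splitOn lower.toList "</table>".toList
  ((PySem.List.slice parts none (some (-1))).foldl (pvStepB html) ([], 0)).1


-- ===== PRECONDITION & SPEC =====
def Spec_find_all_tables (html : String) (out : List String) : Prop := out = find_all_tables_alt html
instance (html : String) (out : List String) : Decidable (Spec_find_all_tables html out) := by unfold Spec_find_all_tables; infer_instance

-- ===== CLAIM (what is proved, stated in full; the proofs are below) =====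
def Claim_equal_find_all_tables : Prop := ∀ (html : String), Dom_find_all_tables html → Spec_find_all_tables html (find_all_tables html)

-- ===== LEMMAS AND PROOFS =====
-- ===== proof-side helpers =====
def pvSepC : List Char := ['<', '/', 't', 'a', 'b', 'l', 'e', '>']
def pvOpenC : List Char := ['<', 't', 'a', 'b', 'l', 'e']

lemma pv_sep_toList : "</table>".toList = pvSepC := by decide
lemma pv_open_toList : "<table".toList = pvOpenC := by decide
lemma pv_sep_len : pvSepC.length = 8 := by decide
lemma pv_open_len : pvOpenC.length = 6 := by decide

lemma pv_findGo_shift (sub : List Char) : ∀ (l : List Char) (k : Nat),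
    PySem.Chars.find.go sub l k =
      if PySem.Chars.find.go sub l 0 = -1 then -1 else PySem.Chars.find.go sub l 0 + k := by
  intro l
  induction l with
  | nil =>
    intro k
    simp only [PySem.Chars.find.go.eq_1]
    split <;> simp
  | cons c t ih =>
    intro k
    rw [PySem.Chars.find.go.eq_2, PySem.Chars.find.go.eq_2]
    split
    · simp
    · have hg := pv_find_neg_or t sub
      unfold PySem.Chars.find at hg
      rw [ih (k + 1), ih 1]
      split_ifs <;> push_cast <;> omega

lemma pv_find_cons_prefix (sub l : List Char) (c : Char) (h : sub.isPrefixOf (c :: l) = true) :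
    PySem.Chars.find (c :: l) sub = 0 := by
  unfold PySem.Chars.find
  rw [PySem.Chars.find.go.eq_2, if_pos h]
  rfl

lemma pv_find_cons (sub l : List Char) (c : Char) (h : ¬ sub.isPrefixOf (c :: l) = true) :
    PySem.Chars.find (c :: l) sub =
      if PySem.Chars.find l sub = -1 then -1 else PySem.Chars.find l sub + 1 := by
  unfold PySem.Chars.find
  rw [PySem.Chars.find.go.eq_2, if_neg h, pv_findGo_shift]
  norm_num

lemma pv_find_eq_of_min (s sub : List Char) (i : Nat)
    (h1 : sub <+: s.drop i) (h2 : ∀ p < i, ¬ sub <+: s.drop p) :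
    PySem.Chars.find s sub = i := by
  have hinf : sub <:+: s := h1.isInfix.trans (List.drop_suffix i s).isInfix
  have hn : 0 ≤ PySem.Chars.find s sub := (PySem.Chars.find_nonneg_iff s sub).mpr hinf
  obtain ⟨hp, hmin⟩ := PySem.Chars.find_spec hn
  rcases lt_trichotomy (PySem.Chars.find s sub).toNat i with hlt | heq | hgt
  · exact absurd hp (h2 _ hlt)
  · omega
  · exact absurd h1 (hmin i hgt)

def pvSplit (s : List Char) : List (List Char) :=
  let j := PySem.Chars.find s pvSepC
  if j = -1 then [s]
  else s.take j.toNat :: pvSplit (s.drop (j.toNat + 8))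
termination_by s.length
decreasing_by
  rename_i h
  have e1 : j = PySem.Chars.find s pvSepC := rfl
  rw [e1] at h
  have hn : 0 ≤ PySem.Chars.find s pvSepC := by
    rcases pv_find_neg_or s pvSepC with h1 | h1
    · exact absurd h1 h
    · exact h1
  have hp := (PySem.Chars.find_spec hn).1.length_le
  simp only [List.length_drop, pv_sep_len] at hp ⊢
  omega

lemma pvSplit_eq (s : List Char) :
    pvSplit s = if PySem.Chars.find s pvSepC = -1 then [s]
      else s.take (PySem.Chars.find s pvSepC).toNat ::
        pvSplit (s.drop ((PySem.Chars.find s pvSepC).toNat + 8)) := by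
  rw [pvSplit]

lemma pvSplit_ne_nil (s : List Char) : pvSplit s ≠ [] := by
  rw [pvSplit_eq]
  split <;> simp

lemma pv_go_nil (fuel : Nat) (cur : List Char) (acc : List (List Char)) :
    PySem.Chars.splitOn.go pvSepC (fuel + 1) [] cur acc = (cur.reverse :: acc).reverse := by
  rw [PySem.Chars.splitOn.go]
  omega

lemma pv_go_pos (fuel : Nat) (c : Char) (rest cur : List Char) (acc : List (List Char))
    (h : pvSepC.isPrefixOf (c :: rest) = true) :
    PySem.Chars.splitOn.go pvSepC (fuel + 1) (c :: rest) cur acc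
      = PySem.Chars.splitOn.go pvSepC fuel (List.drop 8 (c :: rest)) [] (cur.reverse :: acc) := by
  rw [PySem.Chars.splitOn.go]
  rw [if_pos h, pv_sep_len]

lemma pv_go_neg (fuel : Nat) (c : Char) (rest cur : List Char) (acc : List (List Char))
    (h : ¬ pvSepC.isPrefixOf (c :: rest) = true) :
    PySem.Chars.splitOn.go pvSepC (fuel + 1) (c :: rest) cur acc
      = PySem.Chars.splitOn.go pvSepC fuel rest (c :: cur) acc := by
  rw [PySem.Chars.splitOn.go]
  rw [if_neg h]

lemma pv_go_spec : ∀ (fuel : Nat) (l cur : List Char) (acc : List (List Char)),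
    l.length < fuel →
    PySem.Chars.splitOn.go pvSepC fuel l cur acc
      = acc.reverse ++ (pvSplit l).modifyHead (fun p => cur.reverse ++ p) := by
  intro fuel
  induction fuel with
  | zero => intro l cur acc h; omega
  | succ fuel ih =>
    intro l cur acc h
    cases l with
    | nil =>
      rw [pv_go_nil, pvSplit_eq]
      rw [if_pos (by decide : PySem.Chars.find ([]:List Char) pvSepC = -1)]
      simp
    | cons c rest =>
      by_cases hp : pvSepC.isPrefixOf (c :: rest) = true
      · have hfind : PySem.Chars.find (c :: rest) pvSepC = 0 :=
          pv_find_cons_prefix _ _ _ hp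
        rw [pv_go_pos _ _ _ _ _ hp, ih _ _ _ (by simp at h ⊢; omega), pvSplit_eq (c :: rest),
          if_neg (by rw [hfind]; omega), hfind]
        simp only [List.drop_succ_cons, Int.toNat_zero, Nat.zero_add]
        rcases h2 : pvSplit (List.drop 7 rest) with _ | ⟨p, ps⟩ <;> simp
      · have hfind := pv_find_cons pvSepC rest c hp
        rw [pv_go_neg _ _ _ _ _ hp, ih _ _ _ (by simp at h ⊢; omega), pvSplit_eq (c :: rest), hfind]
        rcases pv_find_neg_or rest pvSepC with hr | hr
        · rw [if_pos (by rw [hr]; simp), pvSplit_eq rest, if_pos hr]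
          simp
        · have hne2 : ¬ PySem.Chars.find rest pvSepC = -1 := by omega
          have htn : (PySem.Chars.find rest pvSepC + 1).toNat
              = (PySem.Chars.find rest pvSepC).toNat + 1 := by omega
          rw [if_neg (by split <;> omega), if_neg hne2, htn, pvSplit_eq rest, if_neg hne2]
          have h9 : (PySem.Chars.find rest pvSepC).toNat + 1 + 8
              = ((PySem.Chars.find rest pvSepC).toNat + 8) + 1 := by omega
          rw [h9]
          simp

lemma pv_splitOn_eq (s : List Char) :
    PySem.Chars.splitOn s "</table>".toList = pvSplit s := by
  unfold PySem.Chars.splitOn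
  rw [pv_sep_toList, pv_go_spec _ _ _ _ (by omega)]
  rcases h : pvSplit s with _ | ⟨p, ps⟩
  · exact absurd h (pvSplit_ne_nil s)
  · simp

lemma pv_occ_take (s sub : List Char) (p m : Nat)
    (h : sub <+: s.drop p) (hm : p + sub.length ≤ m) : sub <+: (s.take m).drop p := by
  rw [List.drop_take, List.prefix_take_iff]
  exact ⟨h, by omega⟩

lemma pv_occ_of_take (s sub : List Char) (p m : Nat)
    (h : sub <+: (s.take m).drop p) : sub <+: s.drop p := by
  rw [List.drop_take, List.prefix_take_iff] at h
  exact h.1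

lemma pv_no_straddle (seg rest : List Char) (p : Nat)
    (hp : pvOpenC <+: (seg ++ pvSepC ++ rest).drop p)
    (hlt : p < seg.length + 8) : p + 6 ≤ seg.length := by
  have hslen : (seg ++ pvSepC ++ rest).length = seg.length + 8 + rest.length := by
    simp only [List.length_append, pv_sep_len]
  have hps : p + 6 ≤ (seg ++ pvSepC ++ rest).length := by
    have h1 := hp.length_le
    simp only [List.length_drop, pv_open_len] at h1
    omega
  have hchar : ∀ (x m : Nat) (hm : m < 6) (hxm : x = p + m)
      (hx : x < (seg ++ pvSepC ++ rest).length),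
      (seg ++ pvSepC ++ rest)[x]'hx = pvOpenC[m]'(by rw [pv_open_len]; omega) := by
    intro x m hm hxm hx
    subst hxm
    have := (hp.getElem (i := m) (by rw [pv_open_len]; omega)).symm
    rwa [List.getElem_drop] at this
  have hsep : ∀ (x m' : Nat) (hm' : m' < 8) (hxm : x = seg.length + m')
      (hx : x < (seg ++ pvSepC ++ rest).length),
      (seg ++ pvSepC ++ rest)[x]'hx = pvSepC[m']'(by rw [pv_sep_len]; omega) := by
    intro x m' hm' hxm hx
    subst hxm
    simp only [List.append_assoc]
    rw [List.getElem_append_right (by omega : seg.length ≤ seg.length + m')]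
    rw [List.getElem_append_left (show seg.length + m' - seg.length < pvSepC.length by rw [pv_sep_len]; omega)]
    congr 1
    omega
  by_cases hle : p + 6 ≤ seg.length
  · exact hle
  exfalso
  by_cases hpj : p ≤ seg.length
  · by_cases hm0 : p = seg.length
    · have h1 := hchar (seg.length + 1) 1 (by omega) (by omega) (by omega)
      have h2 := hsep (seg.length + 1) 1 (by omega) (by omega) (by omega)
      rw [h1] at h2
      simp [pvOpenC, pvSepC] at h2
    · have hm : 1 ≤ seg.length - p ∧ seg.length - p < 6 := by omega
      obtain ⟨hm1, hm2⟩ := hm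
      have h1 := hchar seg.length (seg.length - p) (by omega) (by omega) (by omega)
      have h2 := hsep seg.length 0 (by omega) (by omega) (by omega)
      rw [h1] at h2
      have h3 : pvOpenC.getD (seg.length - p) ' ' = '<' := by
        rw [List.getD_eq_getElem _ _ (by rw [pv_open_len]; omega), h2]
        rfl
      set m := seg.length - p with hmdef
      clear_value m
      interval_cases m <;> revert h3 <;> decide
  · have hm : 1 ≤ p - seg.length ∧ p - seg.length < 8 := by omega
    obtain ⟨hm1, hm2⟩ := hm
    have h1 := hchar p 0 (by omega) (by omega) (by omega)
    have h2 := hsep p (p - seg.length) (by omega) (by omega) (by omega)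
    rw [h1] at h2
    have h3 : pvSepC.getD (p - seg.length) ' ' = '<' := by
      rw [List.getD_eq_getElem _ _ (by rw [pv_sep_len]; omega), ← h2]
      rfl
    set m := p - seg.length with hmdef
    clear_value m
    interval_cases m <;> revert h3 <;> decide

lemma pvTablesAux_eq (html lower : String) (start : Nat) (tables : List String) :
    pvTablesAux html lower start tables =
      if PySem.Str.findFrom lower "<table" (start : Int) none = -1 then tables
      else if PySem.Str.findFrom lower "</table>"
          (PySem.Str.findFrom lower "<table" (start : Int) none) none = -1 then tables
      else
        pvTablesAux html lower
          ((PySem.Str.findFrom lower "</table>"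
              (PySem.Str.findFrom lower "<table" (start : Int) none) none) + 8).toNat
          (tables ++ [PySem.Str.slice html
            (some (PySem.Str.findFrom lower "<table" (start : Int) none))
            (some ((PySem.Str.findFrom lower "</table>"
              (PySem.Str.findFrom lower "<table" (start : Int) none) none) + 8))]) := by
  rw [pvTablesAux]

lemma pv_drop_infix_trans {sub l : List Char} (m : Nat) (h : ¬ sub <:+: l) : ¬ sub <:+: l.drop m :=
  fun hinf => h (hinf.trans (List.drop_suffix m l).isInfix)

lemma pv_main_nosep (html lowS : String) (start : Nat) (tables : List String)
    (hstart : start ≤ lowS.toList.length)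
    (hj2 : PySem.Chars.find (lowS.toList.drop start) pvSepC = -1) :
    pvTablesAux html lowS start tables = tables := by
  rw [pvTablesAux_eq]
  simp only [PySem.Str.findFrom_eq, pv_open_toList, pv_sep_toList]
  rw [PySem.Chars.findFrom_natCast lowS.toList pvOpenC start hstart]
  by_cases h1 : PySem.Chars.find (lowS.toList.drop start) pvOpenC = -1
  · rw [if_pos (by rw [h1]; simp)]
  · have h1n : 0 ≤ PySem.Chars.find (lowS.toList.drop start) pvOpenC := by
      rcases pv_find_neg_or (lowS.toList.drop start) pvOpenC with h | h
      · exact absurd h h1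
      · exact h
    rw [if_neg h1, if_neg (by omega)]
    set m := (PySem.Chars.find (lowS.toList.drop start) pvOpenC).toNat with hm
    have hmle : m ≤ lowS.toList.length - start := by
      have := PySem.Chars.find_le_length (lowS.toList.drop start) pvOpenC
      simp only [List.length_drop] at this
      omega
    have hcast : (start : Int) + PySem.Chars.find (lowS.toList.drop start) pvOpenC
        = ((start + m : Nat) : Int) := by push_cast; omega
    rw [hcast, PySem.Chars.findFrom_natCast lowS.toList pvSepC (start + m) (by omega)]
    have hfind2 : PySem.Chars.find (lowS.toList.drop (start + m)) pvSepC = -1 := by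
      rw [PySem.Chars.find_eq_neg_one_iff]
      have := pv_drop_infix_trans m ((PySem.Chars.find_eq_neg_one_iff _ _).mp hj2)
      rwa [List.drop_drop] at this
    rw [if_pos (by rw [hfind2]; simp)]

lemma pv_sep_occ (suf : List Char) (j : Nat)
    (hj2 : PySem.Chars.find suf pvSepC = (j : Int)) :
    j + 8 ≤ suf.length ∧ pvSepC <+: suf.drop j ∧ ∀ p < j, ¬ pvSepC <+: suf.drop p := by
  have h0 : 0 ≤ PySem.Chars.find suf pvSepC := by rw [hj2]; positivity
  have hspec := PySem.Chars.find_spec h0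
  have htn : (PySem.Chars.find suf pvSepC).toNat = j := by rw [hj2]; simp
  rw [htn] at hspec
  refine ⟨?_, hspec.1, fun p hp => hspec.2 p hp⟩
  have := hspec.1.length_le
  simp only [List.length_drop, pv_sep_len] at this
  omega

lemma pv_suf_decomp (suf : List Char) (j : Nat)
    (hj2 : PySem.Chars.find suf pvSepC = (j : Int)) :
    suf = suf.take j ++ pvSepC ++ suf.drop (j + 8) := by
  obtain ⟨hj8, hpre, _⟩ := pv_sep_occ suf j hj2
  obtain ⟨tl, htl⟩ := hpre
  have htl2 : suf.drop (j + 8) = tl := by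
    have : suf.drop (j + 8) = (suf.drop j).drop 8 := by rw [List.drop_drop]
    rw [this, ← htl, ← pv_sep_len, List.drop_left]
  rw [htl2]
  conv_lhs => rw [← List.take_append_drop j suf]
  rw [← htl, List.append_assoc]

lemma pv_no_open_before (suf : List Char) (j : Nat)
    (hj2 : PySem.Chars.find suf pvSepC = (j : Int))
    (hi0 : PySem.Chars.find (suf.take j) pvOpenC = -1) :
    ∀ p < j + 8, ¬ pvOpenC <+: suf.drop p := by
  intro p hp hocc
  obtain ⟨hj8, hpre, _⟩ := pv_sep_occ suf j hj2
  by_cases hpj : p + 6 ≤ j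
  · have hin : pvOpenC <+: (suf.take j).drop p :=
      pv_occ_take suf pvOpenC p j hocc (by rw [pv_open_len]; omega)
    exact (PySem.Chars.find_eq_neg_one_iff _ _).mp hi0
      (hin.isInfix.trans (List.drop_suffix _ _).isInfix)
  · have hsl : (suf.take j).length = j := by simp [List.length_take]; omega
    have hdec := pv_suf_decomp suf j hj2
    have := pv_no_straddle (suf.take j) (suf.drop (j + 8)) p
      (by rw [← hdec]; exact hocc) (by rw [hsl]; omega)
    omega

lemma pv_find_open_shift (suf : List Char) (j : Nat)
    (hj2 : PySem.Chars.find suf pvSepC = (j : Int))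
    (hi0 : PySem.Chars.find (suf.take j) pvOpenC = -1) :
    PySem.Chars.find suf pvOpenC =
      if PySem.Chars.find (suf.drop (j + 8)) pvOpenC = -1 then -1
      else ((j : Int) + 8) + PySem.Chars.find (suf.drop (j + 8)) pvOpenC := by
  have hno := pv_no_open_before suf j hj2 hi0
  rcases pv_find_neg_or (suf.drop (j + 8)) pvOpenC with hr | hr
  · rw [hr, if_pos rfl]
    by_contra hne
    have h0 : 0 ≤ PySem.Chars.find suf pvOpenC := by
      rcases pv_find_neg_or suf pvOpenC with h | h
      · exact absurd h hne
      · exact h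
    have hspec := PySem.Chars.find_spec h0
    by_cases hq : (PySem.Chars.find suf pvOpenC).toNat < j + 8
    · exact hno _ hq hspec.1
    · have hdd : suf.drop (PySem.Chars.find suf pvOpenC).toNat
          = (suf.drop (j + 8)).drop ((PySem.Chars.find suf pvOpenC).toNat - (j + 8)) := by
        rw [List.drop_drop]; congr 1; omega
      rw [hdd] at hspec
      exact (PySem.Chars.find_eq_neg_one_iff _ _).mp hr
        (hspec.1.isInfix.trans (List.drop_suffix _ _).isInfix)
  · have hspecr := PySem.Chars.find_spec hr
    have heq : PySem.Chars.find suf pvOpenC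
        = ((j + 8 + (PySem.Chars.find (suf.drop (j + 8)) pvOpenC).toNat : Nat) : Int) := by
      apply pv_find_eq_of_min
      · rw [show j + 8 + (PySem.Chars.find (suf.drop (j + 8)) pvOpenC).toNat
            = (j + 8) + (PySem.Chars.find (suf.drop (j + 8)) pvOpenC).toNat from rfl,
          ← List.drop_drop]
        exact hspecr.1
      · intro p hpp hocc
        by_cases hq : p < j + 8
        · exact hno _ hq hocc
        · have hdd : suf.drop p = (suf.drop (j + 8)).drop (p - (j + 8)) := by
            rw [List.drop_drop]; congr 1; omega
          rw [hdd] at hocc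
          exact hspecr.2 (p - (j + 8)) (by omega) hocc
    rw [heq, if_neg (by omega)]
    push_cast
    omega

lemma pv_skip_findFrom (lowS : String) (start j : Nat)
    (hstart : start ≤ lowS.toList.length)
    (hj2 : PySem.Chars.find (lowS.toList.drop start) pvSepC = (j : Int))
    (hi0 : PySem.Chars.find ((lowS.toList.drop start).take j) pvOpenC = -1) :
    PySem.Chars.findFrom lowS.toList pvOpenC (start : Int) none
      = PySem.Chars.findFrom lowS.toList pvOpenC ((start + (j + 8) : Nat) : Int) none := by
  obtain ⟨hj8, _, _⟩ := pv_sep_occ _ j hj2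
  simp only [List.length_drop] at hj8
  rw [PySem.Chars.findFrom_natCast _ _ start hstart,
    PySem.Chars.findFrom_natCast _ _ (start + (j + 8)) (by omega)]
  have hdd : lowS.toList.drop (start + (j + 8)) = (lowS.toList.drop start).drop (j + 8) := by
    rw [List.drop_drop]
  rw [hdd, pv_find_open_shift _ j hj2 hi0]
  by_cases hc : PySem.Chars.find ((lowS.toList.drop start).drop (j + 8)) pvOpenC = -1
  · rw [if_pos hc]
    simp only [reduceIte]
    rw [if_pos hc]
  · have hcn : 0 ≤ PySem.Chars.find ((lowS.toList.drop start).drop (j + 8)) pvOpenC := by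
      rcases pv_find_neg_or ((lowS.toList.drop start).drop (j + 8)) pvOpenC with h | h
      · exact absurd h hc
      · exact h
    simp only [if_neg hc]
    rw [if_neg (by omega)]
    push_cast
    omega

lemma pv_main_skip (html lowS : String) (start j : Nat) (tables : List String)
    (hstart : start ≤ lowS.toList.length)
    (hj2 : PySem.Chars.find (lowS.toList.drop start) pvSepC = (j : Int))
    (hi0 : PySem.Chars.find ((lowS.toList.drop start).take j) pvOpenC = -1) :
    pvTablesAux html lowS start tables = pvTablesAux html lowS (start + (j + 8)) tables := by
  rw [pvTablesAux_eq, pvTablesAux_eq html lowS (start + (j + 8))]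
  simp only [PySem.Str.findFrom_eq, pv_open_toList, pv_sep_toList]
  rw [pv_skip_findFrom lowS start j hstart hj2 hi0]

lemma pv_find_open_at (suf : List Char) (j m : Nat)
    (hj2 : PySem.Chars.find suf pvSepC = (j : Int))
    (hi0 : PySem.Chars.find (suf.take j) pvOpenC = (m : Int)) :
    PySem.Chars.find suf pvOpenC = (m : Int) ∧ m + 6 ≤ j := by
  obtain ⟨hj8, hpre, hmin⟩ := pv_sep_occ suf j hj2
  have h0 : 0 ≤ PySem.Chars.find (suf.take j) pvOpenC := by rw [hi0]; positivity
  have hspec := PySem.Chars.find_spec h0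
  have htn : (PySem.Chars.find (suf.take j) pvOpenC).toNat = m := by rw [hi0]; simp
  rw [htn] at hspec
  have hsl : (suf.take j).length = j := by simp [List.length_take]; omega
  have hm6 : m + 6 ≤ j := by
    have := hspec.1.length_le
    simp only [List.length_drop, pv_open_len, hsl] at this
    omega
  refine ⟨pv_find_eq_of_min _ _ m (pv_occ_of_take suf pvOpenC m j hspec.1) ?_, hm6⟩
  intro p hp hocc
  exact hspec.2 p hp (pv_occ_take suf pvOpenC p j hocc (by rw [pv_open_len]; omega))

lemma pv_find_sep_from (suf : List Char) (j m : Nat)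
    (hj2 : PySem.Chars.find suf pvSepC = (j : Int)) (hm : m ≤ j) :
    PySem.Chars.find (suf.drop m) pvSepC = ((j - m : Nat) : Int) := by
  obtain ⟨hj8, hpre, hmin⟩ := pv_sep_occ suf j hj2
  apply pv_find_eq_of_min
  · have hdd : (suf.drop m).drop (j - m) = suf.drop j := by
      rw [List.drop_drop]; congr 1; omega
    rw [hdd]; exact hpre
  · intro p hp hocc
    rw [List.drop_drop] at hocc
    exact hmin (m + p) (by omega) hocc

lemma pv_main (html lowS : String) : ∀ (fuel start : Nat) (tables : List String),
    lowS.toList.length - start ≤ fuel → start ≤ lowS.toList.length →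
    pvTablesAux html lowS start tables
      = ((pvSplit (lowS.toList.drop start)).dropLast.foldl (pvStepB html)
          (tables, (start : Int))).1 := by
  intro fuel
  induction fuel with
  | zero =>
    intro start tables hf hs
    have hnil : lowS.toList.drop start = [] := List.drop_eq_nil_of_le (by omega)
    have hj2 : PySem.Chars.find (lowS.toList.drop start) pvSepC = -1 := by
      rw [hnil]; decide
    rw [pv_main_nosep html lowS start tables hs hj2, pvSplit_eq, if_pos hj2]
    simp
  | succ fuel ih =>
    intro start tables hf hs
    rcases pv_find_neg_or (lowS.toList.drop start) pvSepC with hj2 | hj2p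
    · rw [pv_main_nosep html lowS start tables hs hj2, pvSplit_eq, if_pos hj2]
      simp
    · obtain ⟨j, hj2⟩ : ∃ j : Nat, PySem.Chars.find (lowS.toList.drop start) pvSepC = (j : Int) :=
        ⟨_, (Int.toNat_of_nonneg hj2p).symm⟩
      obtain ⟨hj8, hpre, hmin⟩ := pv_sep_occ _ j hj2
      simp only [List.length_drop] at hj8
      have hsl : ((lowS.toList.drop start).take j).length = j := by
        rw [List.length_take, List.length_drop]; omega
      have hdd : (lowS.toList.drop start).drop (j + 8) = lowS.toList.drop (start + (j + 8)) := by
        rw [List.drop_drop]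
      have hsplit : pvSplit (lowS.toList.drop start)
          = (lowS.toList.drop start).take j :: pvSplit (lowS.toList.drop (start + (j + 8))) := by
        rw [pvSplit_eq, if_neg (by rw [hj2]; omega), hj2]
        rw [show ((j : Int)).toNat = j from by simp, hdd]
      have hdropLast : (pvSplit (lowS.toList.drop start)).dropLast
          = (lowS.toList.drop start).take j
              :: (pvSplit (lowS.toList.drop (start + (j + 8)))).dropLast := by
        rw [hsplit, List.dropLast_cons_of_ne_nil (pvSplit_ne_nil _)]
      rw [hdropLast, List.foldl_cons]
      have hcast : (start : Int) + (j : Int) + 8 = ((start + (j + 8) : Nat) : Int) := by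
        push_cast; ring
      rcases pv_find_neg_or ((lowS.toList.drop start).take j) pvOpenC with hi0 | hi0p
      · have hstep : pvStepB html (tables, (start : Int)) ((lowS.toList.drop start).take j)
            = (tables, ((start + (j + 8) : Nat) : Int)) := by
          simp only [pvStepB, pv_open_toList, hi0, hsl, ne_eq]
          rw [if_neg (by simp), hcast]
        rw [hstep, pv_main_skip html lowS start j tables hs hj2 hi0,
          ih (start + (j + 8)) tables (by omega) (by omega)]
      · obtain ⟨m, hi0⟩ : ∃ m : Nat,
            PySem.Chars.find ((lowS.toList.drop start).take j) pvOpenC = (m : Int) :=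
          ⟨_, (Int.toNat_of_nonneg hi0p).symm⟩
        obtain ⟨hfo, hm6⟩ := pv_find_open_at _ j m hj2 hi0
        have hc1 : (start : Int) + (m : Int) = ((start + m : Nat) : Int) := by push_cast; ring
        have hsepm : PySem.Chars.find (lowS.toList.drop (start + m)) pvSepC
            = ((j - m : Nat) : Int) := by
          have h := pv_find_sep_from (lowS.toList.drop start) j m hj2 (by omega)
          rwa [List.drop_drop] at h
        have hc2 : ((start + m : Nat) : Int) + ((j - m : Nat) : Int) + 8
            = ((start + (j + 8) : Nat) : Int) := by
          push_cast [Nat.cast_sub (by omega : m ≤ j)]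
          ring
        rw [pvTablesAux_eq]
        simp only [PySem.Str.findFrom_eq, pv_open_toList, pv_sep_toList]
        rw [PySem.Chars.findFrom_natCast _ _ start hs, hfo,
          if_neg (by omega : ¬((m : Int) = -1)), hc1,
          PySem.Chars.findFrom_natCast _ _ (start + m) (by omega), hsepm,
          if_neg (by omega : ¬(((j - m : Nat) : Int) = -1)), hc2,
          Int.toNat_natCast,
          ih (start + (j + 8)) _ (by omega) (by omega)]
        have hstep : pvStepB html (tables, (start : Int)) ((lowS.toList.drop start).take j)
            = (tables ++ [PySem.Str.slice html (some ((start + m : Nat) : Int))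
                (some ((start + (j + 8) : Nat) : Int))], ((start + (j + 8) : Nat) : Int)) := by
          simp only [pvStepB, pv_open_toList, hi0, hsl, ne_eq]
          rw [if_pos (by omega : ¬((m : Int) = -1)), hc1, hcast]
        rw [hstep, if_neg (by omega : ¬(((start + m : Nat) : Int) = -1)),
          if_neg (by omega : ¬(((start + m : Nat) : Int) + ((j - m : Nat) : Int) = -1))]

lemma pv_final (html : String) : find_all_tables html = find_all_tables_alt html := by
  unfold find_all_tables find_all_tables_alt
  rw [pv_main html (PySem.Str.lower html) ((PySem.Str.lower html).toList.length) 0 []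
    (by omega) (by omega)]
  simp only [pv_splitOn_eq, PySem.List.slice_to_neg_one, List.drop_zero, Nat.cast_zero]

-- ===== VERDICT (by name: the statement is the Claim_ definition above) =====
theorem find_all_tables_spec : Claim_equal_find_all_tables := by
  intro html _
  unfold Spec_find_all_tables
  exact pv_final html
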